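-- pv_equiv track=rewrite | github.com/divs-spec/Leetcode-All-Questions | Leetcode Contest/Biweekly Contest 159/Count Prime-Gap Balanced Subarrays.py | primeSubarray
-- ===== SOURCE A (Python) =====
-- from typing import List
-- from math import isqrt
-- from math import isqrt
-- from typing import List
--
-- def primeSubarray(nums: List[int], k: int) -> int:
--     # Precompute primes using sieve
--     MAX = 50001
--     is_prime = [False, False] + [True] * (MAX - 2)
--     for i in range(2, isqrt(MAX) + 1):
--         if is_prime[i]:
--             for j in range(i * i, MAX, i):
--                 is_prime[j] = False
--
--     zelmoricad = nums[:]  # Store input midway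
--     n = len(nums)
--     count = 0
--
--     for i in range(n):
--         primes = []
--         max_p = float('-inf')
--         min_p = float('inf')
--
--         for j in range(i, n):
--             val = zelmoricad[j]
--             if is_prime[val]:
--                 primes.append(val)
--                 max_p = max(max_p, val)
--                 min_p = min(min_p, val)
--
--             if len(primes) >= 2 and (max_p - min_p) <= k:
--                 count += 1
--
--             # Optional optimization: early break if too many primes and gap exceeded
--             if len(primes) >= 2 and (max_p - min_p) > k:
--                 break
--
--     return count
-- ===== SOURCE B (Python) =====
-- from math import isqrt
-- from typing import List
--
-- def primeSubarray(nums: List[int], k: int) -> int: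
--     # Sieve (same precomputation as the original)
--     MAX = 50001
--     is_prime = [False, False] + [True] * (MAX - 2)
--     for i in range(2, isqrt(MAX) + 1):
--         if is_prime[i]:
--             for j in range(i * i, MAX, i):
--                 is_prime[j] = False
--
--     ans = 0
--     lo = 0          # smallest still-possible left endpoint
--     win = []        # (position, value) of the primes in nums[lo..j]
--     for j, v in enumerate(nums):
--         if is_prime[v]:
--             win.append((j, v))
--         # shrink: any left endpoint at or before win[0] position is dead for
--         # this and every later right endpoint once the prime gap exceeds k
--         while len(win) >= 2 and max(w for _, w in win) - min(w for _, w in win) > k: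
--             lo = win[0][0] + 1
--             win.pop(0)
--         # valid left endpoints for right endpoint j form the interval
--         # [lo, position of the second-to-last prime]
--         if len(win) >= 2:
--             ans += win[-2][0] - lo + 1
--     return ans
-- ===== Notes on version B (the rewrite author's own statement) =====
-- stated objective: faster
-- what changed: A scans forward from every start index, rebuilding the prime list and running max/min for each i; B makes a single left-to-right pass that keeps the (position,value) primes of the current window with a monotone left pointer, shrinks while the prime spread exceeds k, and adds the whole interval of valid left endpoints per right endpoint instead of counting them one by one.
import Mathlib
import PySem

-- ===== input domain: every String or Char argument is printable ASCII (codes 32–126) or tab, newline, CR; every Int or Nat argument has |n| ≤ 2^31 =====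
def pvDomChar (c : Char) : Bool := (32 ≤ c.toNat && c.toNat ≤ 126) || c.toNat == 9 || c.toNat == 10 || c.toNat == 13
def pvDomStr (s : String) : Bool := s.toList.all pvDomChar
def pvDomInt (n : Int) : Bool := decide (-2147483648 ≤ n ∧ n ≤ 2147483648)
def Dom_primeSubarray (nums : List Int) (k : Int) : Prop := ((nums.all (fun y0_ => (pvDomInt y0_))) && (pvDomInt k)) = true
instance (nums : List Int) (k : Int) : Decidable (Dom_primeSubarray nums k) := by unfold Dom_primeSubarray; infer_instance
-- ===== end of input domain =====

-- B replaces A's per-start rescans by a single left-to-right sliding window over prime positions with a monotone left pointer (objective: faster).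


-- ===== PORT A =====
-- The sieve precomputation both Pythons run verbatim (a Python list of bools; the
-- mutated list is an Array here, written only by in-range nonnegative indices, so
-- setIfInBounds is exactly the Python assignment).  math.isqrt(50001) = Nat.sqrt 50001
-- (exact: the argument is a nonnegative literal).
def pvSieve : Array Bool :=
  let init : Array Bool := #[false, false] ++ Array.replicate (50001 - 2) true
  (PySem.List.pyRange 2 (((Nat.sqrt 50001 : ℕ) : ℤ) + 1)).foldl
    (fun ip i =>
      if ip.getD i.toNat false then
        (PySem.List.pyRange (i * i) 50001 i).foldl
          (fun ip2 j => ip2.setIfInBounds j.toNat false) ip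
      else ip) init

-- Python list indexing `is_prime[val]` on the sieve: negative index counts from the
-- end; out of range is an IndexError (excluded by Pre_, `false` returned there).
def pvPrime (v : Int) : Bool :=
  let idx := if v < 0 then v + (pvSieve.size : Int) else v
  if 0 ≤ idx ∧ idx < (pvSieve.size : Int) then pvSieve.getD idx.toNat false else false

-- A's inner `for j in range(i, n)` loop with its early `break`.  Python's
-- float('-inf')/float('inf') sentinels are `none`: `max_p - min_p` is only read
-- under `len(primes) >= 2`, where both are `some` — exact on every admitted input.
def pvInner (nums : List Int) (k : Int) :
    List Int → List Int → Option Int → Option Int → Int → Int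
  | [], _, _, _, count => count
  | j :: js, primes, maxP, minP, count =>
    let val := PySem.List.pyGetD nums j 0
    let (primes', maxP', minP') :=
      if pvPrime val then
        (primes ++ [val],
         some (match maxP with | none => val | some m => max m val),
         some (match minP with | none => val | some m => min m val))
      else (primes, maxP, minP)
    let count' :=
      if 2 ≤ primes'.length ∧ maxP'.getD 0 - minP'.getD 0 ≤ k then count + 1 else count
    if 2 ≤ primes'.length ∧ k < maxP'.getD 0 - minP'.getD 0 then count'
    else pvInner nums k js primes' maxP' minP' count'

def primeSubarray (nums : List Int) (k : Int) : Int :=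
  let zelmoricad := PySem.List.slice nums none none
  let n : Int := PySem.List.len nums
  (PySem.List.pyRange 0 n).foldl
    (fun count i => pvInner zelmoricad k (PySem.List.pyRange i n) [] none none count) 0

-- ===== PORT B =====
-- Source B's `while` shrink loop: pop the leftmost window prime while ≥ 2 primes and
-- their value spread exceeds k, moving `lo` past the popped position.  Python's
-- max(...)/min(...) over the nonempty window are PySem.List.max?/min?; the `.getD 0`
-- is only read under the `2 ≤ length` guard.
def pvShrink (k : Int) : List (Int × Int) → Int → List (Int × Int) × Int
  | [], lo => ([], lo)
  | w :: ws, lo =>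
    if 2 ≤ (w :: ws).length ∧
        k < (PySem.List.max? ((w :: ws).map Prod.snd) (fun x => x)).getD 0 -
              (PySem.List.min? ((w :: ws).map Prod.snd) (fun x => x)).getD 0 then
      pvShrink k ws (w.1 + 1)
    else (w :: ws, lo)

def primeSubarray_alt (nums : List Int) (k : Int) : Int :=
  (((PySem.List.enumerate nums).foldl
    (fun (s : Int × Int × List (Int × Int)) jv =>
      let win1 := if pvPrime jv.2 then s.2.2 ++ [jv] else s.2.2
      let r := pvShrink k win1 s.2.1
      let ans' :=
        if 2 ≤ r.1.length then s.1 + (PySem.List.pyGetD r.1 (-2) (0, 0)).1 - r.2 + 1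
        else s.1
      (ans', r.2, r.1)) (0, 0, [])) : Int × Int × List (Int × Int)).1

-- ===== PRECONDITION & SPEC =====
-- Pre_ excludes exactly the inputs on which the Python A raises IndexError: some
-- element outside [-50001, 50000], the index range of the 50001-entry sieve
-- (every element is read, so A raises iff one is out of range; B reads the same
-- sieve and raises on the same inputs).
def Pre_primeSubarray (nums : List Int) (k : Int) : Prop :=
  ∀ x ∈ nums, -50001 ≤ x ∧ x ≤ 50000
instance (nums : List Int) (k : Int) : Decidable (Pre_primeSubarray nums k) := by
  unfold Pre_primeSubarray; infer_instance

def pvWitness_primeSubarray : List Int × Int := ([2, 4, 3, 7, 10], 4)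

def Spec_primeSubarray (nums : List Int) (k : Int) (out : Int) : Prop := out = primeSubarray_alt nums k
instance (nums : List Int) (k : Int) (out : Int) : Decidable (Spec_primeSubarray nums k out) := by unfold Spec_primeSubarray; infer_instance

-- ===== CLAIM (what is proved, stated in full; the proofs are below) =====
def Claim_equal_primeSubarray : Prop := ∀ (nums : List Int) (k : Int), Dom_primeSubarray nums k → Pre_primeSubarray nums k → Spec_primeSubarray nums k (primeSubarray nums k)

-- ===== LEMMAS AND PROOFS =====

-- ---------- canonical window data ----------

def PVw (nums : List Int) (a e : ℕ) : List Int :=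
  ((nums.drop a).take (e - a)).filter (fun v => pvPrime v)

def pvStepMax (o : Option Int) (v : Int) : Option Int :=
  some (match o with | none => v | some m => max m v)

def pvStepMin (o : Option Int) (v : Int) : Option Int :=
  some (match o with | none => v | some m => min m v)

def OMX (l : List Int) : Option Int := l.foldl pvStepMax none
def OMN (l : List Int) : Option Int := l.foldl pvStepMin none
def MXL (l : List Int) : Int := (OMX l).getD 0
def MNL (l : List Int) : Int := (OMN l).getD 0

abbrev Gd (nums : List Int) (k : Int) (a e : ℕ) : Prop :=
  2 ≤ (PVw nums a e).length ∧ MXL (PVw nums a e) - MNL (PVw nums a e) ≤ k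

abbrev Bd (nums : List Int) (k : Int) (a e : ℕ) : Prop :=
  2 ≤ (PVw nums a e).length ∧ k < MXL (PVw nums a e) - MNL (PVw nums a e)

-- ---------- extrema facts ----------

lemma OMX_append (l : List Int) (v : Int) : OMX (l ++ [v]) = pvStepMax (OMX l) v := by
  simp [OMX, List.foldl_append]

lemma OMN_append (l : List Int) (v : Int) : OMN (l ++ [v]) = pvStepMin (OMN l) v := by
  simp [OMN, List.foldl_append]

lemma foldl_pvStepMax (t : List Int) : ∀ x : Int, t.foldl pvStepMax (some x) = some (t.foldl max x) := by
  induction t with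
  | nil => intro x; rfl
  | cons v t ih => intro x; simpa [pvStepMax] using ih (max x v)

lemma foldl_pvStepMin (t : List Int) : ∀ x : Int, t.foldl pvStepMin (some x) = some (t.foldl min x) := by
  induction t with
  | nil => intro x; rfl
  | cons v t ih => intro x; simpa [pvStepMin] using ih (min x v)

lemma OMX_cons (x : Int) (t : List Int) : OMX (x :: t) = some (t.foldl max x) := by
  simpa [OMX, pvStepMax] using foldl_pvStepMax t x

lemma OMN_cons (x : Int) (t : List Int) : OMN (x :: t) = some (t.foldl min x) := by
  simpa [OMN, pvStepMin] using foldl_pvStepMin t x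

lemma MXL_mem {l : List Int} (h : l ≠ []) : MXL l ∈ l := by
  cases l with
  | nil => exact absurd rfl h
  | cons x t => rw [MXL, OMX_cons]; exact List.max?_mem rfl

lemma le_MXL {l : List Int} {y : Int} (hy : y ∈ l) : y ≤ MXL l := by
  cases l with
  | nil => simp at hy
  | cons x t =>
    rw [MXL, OMX_cons]
    rcases List.mem_cons.1 hy with h | h
    · subst h; exact (PySem.List.le_foldl_max t y).1
    · exact (PySem.List.le_foldl_max t x).2 y h

lemma MNL_mem {l : List Int} (h : l ≠ []) : MNL l ∈ l := by
  cases l with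
  | nil => exact absurd rfl h
  | cons x t => rw [MNL, OMN_cons]; exact List.min?_mem rfl

lemma MNL_le {l : List Int} {y : Int} (hy : y ∈ l) : MNL l ≤ y := by
  cases l with
  | nil => simp at hy
  | cons x t =>
    rw [MNL, OMN_cons]
    rcases List.mem_cons.1 hy with h | h
    · subst h; exact (PySem.List.foldl_min_le t y).1
    · exact (PySem.List.foldl_min_le t x).2 y h

lemma gap_mono {l m : List Int} (hsub : ∀ x ∈ l, x ∈ m) (hl : l ≠ []) :
    MXL l - MNL l ≤ MXL m - MNL m := by
  have h1 : MXL l ≤ MXL m := le_MXL (hsub _ (MXL_mem hl))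
  have h2 : MNL m ≤ MNL l := MNL_le (hsub _ (MNL_mem hl))
  omega

-- ---------- window shape facts ----------

lemma PVw_nil {nums : List Int} {a e : ℕ} (h : e ≤ a) : PVw nums a e = [] := by
  simp [PVw, Nat.sub_eq_zero_of_le h]

lemma PVw_split (nums : List Int) {a b e : ℕ} (h1 : a ≤ b) (h2 : b ≤ e) :
    PVw nums a e = PVw nums a b ++ PVw nums b e := by
  unfold PVw
  rw [← List.filter_append]
  congr 1
  have hd : nums.drop b = (nums.drop a).drop (b - a) := by
    rw [List.drop_drop]; congr 1; omega
  rw [hd, ← List.take_add]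
  congr 1; omega

lemma PVw_succ (nums : List Int) {a e : ℕ} (h1 : a ≤ e) (h2 : e < nums.length) :
    PVw nums a (e + 1) =
      PVw nums a e ++ (if pvPrime (nums.getD e 0) then [nums.getD e 0] else []) := by
  rw [PVw_split nums h1 (Nat.le_succ e)]
  congr 1
  unfold PVw
  have hg : nums.getD e 0 = nums[e] := by
    simp [List.getD_eq_getElem?_getD, List.getElem?_eq_getElem h2]
  have ht : e + 1 - e = 1 := by omega
  rw [List.drop_eq_getElem_cons h2, ht, hg, List.take_succ_cons, List.take_zero,
    List.filter_cons, List.filter_nil]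

lemma Bd_mono {nums : List Int} {k : Int} {i e e' : ℕ} (hb : Bd nums k i e) (h : e ≤ e') :
    Bd nums k i e' := by
  rcases hb with ⟨hlen, hgap⟩
  have hie : i ≤ e := by
    by_contra hie
    rw [PVw_nil (by omega)] at hlen; simp at hlen
  have hsplit := PVw_split nums hie h
  have hne : PVw nums i e ≠ [] := by
    intro hn; rw [hn] at hlen; simp at hlen
  constructor
  · rw [hsplit, List.length_append]; omega
  · have := gap_mono (l := PVw nums i e) (m := PVw nums i e')
      (by intro x hx; rw [hsplit]; exact List.mem_append_left _ hx) hne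
    omega

lemma not_Gd_of_Bd {nums : List Int} {k : Int} {i e : ℕ} (hb : Bd nums k i e) :
    ¬ Gd nums k i e := by
  rcases hb with ⟨_, h2⟩; rintro ⟨_, h4⟩; omega

lemma Gd_false_of_le {nums : List Int} {k : Int} {i j : ℕ} (h : j + 1 ≤ i) :
    ¬ Gd nums k i (j + 1) := by
  rintro ⟨h2, _⟩; rw [PVw_nil h] at h2; simp at h2

-- ---------- A-side: the inner loop with break counts the good right endpoints ----------

lemma pvInner_spec (nums : List Int) (k : Int) :
    ∀ (d i e : ℕ), nums.length - e ≤ d → i ≤ e → e ≤ nums.length → ∀ c : Int,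
    pvInner nums k (PySem.List.pyRange (e : ℤ) (nums.length : ℤ))
        (PVw nums i e) (OMX (PVw nums i e)) (OMN (PVw nums i e)) c
      = c + ∑ j ∈ Finset.Ico e nums.length, (if Gd nums k i (j + 1) then (1 : ℤ) else 0) := by
  intro d
  induction d with
  | zero =>
    intro i e hd hie he c
    have he' : e = nums.length := by omega
    subst he'
    rw [PySem.List.pyRange_one_eq_nil (le_refl _)]
    simp [pvInner]
  | succ d ih =>
    intro i e hd hie he c
    by_cases h : e < nums.length
    · have hcast : ((e : ℕ) : ℤ) < ((nums.length : ℕ) : ℤ) := by exact_mod_cast h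
      rw [PySem.List.pyRange_one_cons hcast]
      have hsucc : ((e : ℕ) : ℤ) + 1 = (((e + 1 : ℕ)) : ℤ) := by push_cast; ring
      simp only [pvInner, PySem.List.pyGetD_natCast]
      set v := nums.getD e 0 with hv
      have hP : (if pvPrime v = true then
            (PVw nums i e ++ [v], pvStepMax (OMX (PVw nums i e)) v,
              pvStepMin (OMN (PVw nums i e)) v)
          else (PVw nums i e, OMX (PVw nums i e), OMN (PVw nums i e)))
          = (PVw nums i (e + 1), OMX (PVw nums i (e + 1)), OMN (PVw nums i (e + 1))) := by
        by_cases hp : pvPrime v = true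
        · rw [if_pos hp, PVw_succ nums hie h, if_pos hp, OMX_append, OMN_append]
        · rw [if_neg hp, PVw_succ nums hie h, if_neg hp, List.append_nil]
      simp only [pvStepMax, pvStepMin] at hP
      rw [hP]
      dsimp only
      have hgd : (2 ≤ (PVw nums i (e + 1)).length ∧
            (OMX (PVw nums i (e + 1))).getD 0 - (OMN (PVw nums i (e + 1))).getD 0 ≤ k)
          = Gd nums k i (e + 1) := by
        simp only [Gd, MXL, MNL]
      have hbd : (2 ≤ (PVw nums i (e + 1)).length ∧
            k < (OMX (PVw nums i (e + 1))).getD 0 - (OMN (PVw nums i (e + 1))).getD 0)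
          = Bd nums k i (e + 1) := by
        simp only [Bd, MXL, MNL]
      simp only [hgd, hbd]
      rw [Finset.sum_eq_sum_Ico_succ_bot h]
      by_cases hb : Bd nums k i (e + 1)
      · rw [if_pos hb, if_neg (not_Gd_of_Bd hb)]
        have hz : ∀ j ∈ Finset.Ico (e + 1) nums.length,
            (if Gd nums k i (j + 1) then (1 : ℤ) else 0) = 0 := by
          intro j hj
          rw [Finset.mem_Ico] at hj
          exact if_neg (not_Gd_of_Bd (Bd_mono hb (by omega)))
        rw [Finset.sum_eq_zero hz, if_neg (not_Gd_of_Bd hb)]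
        ring
      · rw [if_neg hb, hsucc, ih i (e + 1) (by omega) (by omega) (by omega)]
        by_cases hg : Gd nums k i (e + 1)
        · rw [if_pos hg, if_pos hg]; ring
        · rw [if_neg hg, if_neg hg]; ring
    · have he' : e = nums.length := by omega
      subst he'
      rw [PySem.List.pyRange_one_eq_nil (le_refl _)]
      simp [pvInner]

lemma primeSubarray_eq_sum (nums : List Int) (k : Int) :
    primeSubarray nums k =
      ∑ i ∈ Finset.range nums.length, ∑ j ∈ Finset.Ico i nums.length,
        (if Gd nums k i (j + 1) then (1 : ℤ) else 0) := by
  unfold primeSubarray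
  simp only [PySem.List.slice_none_none, PySem.List.len_eq]
  rw [PySem.List.pyRange_zero_nat, List.foldl_map]
  refine Eq.trans (PySem.List.foldl_congr_mem _ _
    (fun count i => count + ∑ j ∈ Finset.Ico i nums.length,
      (if Gd nums k i (j + 1) then (1 : ℤ) else 0)) 0 ?_) ?_
  · intro c i hi
    rw [List.mem_range] at hi
    have hspec := pvInner_spec nums k (nums.length - i) i i (by omega) (le_refl i)
      (by omega) c
    rw [PVw_nil (le_refl i)] at hspec
    simpa [OMX, OMN] using hspec
  · rw [PySem.List.foldl_add, zero_add]
    rfl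

-- ---------- B-side: the prime window ----------

def EWf (nums : List Int) (a m : ℕ) : List (Int × Int) :=
  if a < m then
    (if pvPrime (nums.getD a 0) then [((a : ℤ), nums.getD a 0)] else []) ++ EWf nums (a + 1) m
  else []
termination_by m - a

lemma EWf_nil {nums : List Int} {a m : ℕ} (h : m ≤ a) : EWf nums a m = [] := by
  rw [EWf]; simp [Nat.not_lt.2 h]

lemma EWf_unfold {nums : List Int} {a m : ℕ} (h : a < m) :
    EWf nums a m =
      (if pvPrime (nums.getD a 0) then [((a : ℤ), nums.getD a 0)] else []) ++ EWf nums (a + 1) m := by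
  rw [EWf]; simp [h]

lemma EWf_split (nums : List Int) : ∀ (d a b m : ℕ), b - a ≤ d → a ≤ b → b ≤ m →
    EWf nums a m = EWf nums a b ++ EWf nums b m := by
  intro d
  induction d with
  | zero =>
    intro a b m hd hab hbm
    have : a = b := by omega
    subst this
    rw [EWf_nil (le_refl a)]; rfl
  | succ d ih =>
    intro a b m hd hab hbm
    by_cases hab' : a = b
    · subst hab'; rw [EWf_nil (le_refl a)]; rfl
    · have h1 : a < b := by omega
      have h2 : a < m := by omega
      rw [EWf_unfold h2, EWf_unfold h1, ih (a + 1) b m (by omega) (by omega) hbm,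
        List.append_assoc]

lemma EWf_mem (nums : List Int) : ∀ (d a m : ℕ), m - a ≤ d → ∀ q : Int × Int,
    (q ∈ EWf nums a m ↔ ∃ t : ℕ, a ≤ t ∧ t < m ∧ pvPrime (nums.getD t 0) = true ∧
      q = ((t : ℤ), nums.getD t 0)) := by
  intro d
  induction d with
  | zero =>
    intro a m hd q
    rw [EWf_nil (by omega)]
    constructor
    · intro h; simp at h
    · rintro ⟨t, h1, h2, _, _⟩; omega
  | succ d ih =>
    intro a m hd q
    by_cases h : a < m
    · rw [EWf_unfold h]
      constructor
      · intro hq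
        rcases List.mem_append.1 hq with hq | hq
        · by_cases hp : pvPrime (nums.getD a 0) = true
          · rw [if_pos hp] at hq
            simp at hq
            exact ⟨a, le_refl a, h, hp, by simp [hq]⟩
          · rw [if_neg hp] at hq; simp at hq
        · rcases (ih (a + 1) m (by omega) q).1 hq with ⟨t, ht1, ht2, ht3, ht4⟩
          exact ⟨t, by omega, ht2, ht3, ht4⟩
      · rintro ⟨t, ht1, ht2, hp, rfl⟩
        by_cases hta : t = a
        · subst hta
          apply List.mem_append_left
          rw [if_pos hp]; simp
        · apply List.mem_append_right
          exact (ih (a + 1) m (by omega) _).2 ⟨t, by omega, ht2, hp, rfl⟩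
    · rw [EWf_nil (by omega)]
      constructor
      · intro hq; simp at hq
      · rintro ⟨t, h1, h2, _, _⟩; omega

lemma EWf_pairwise (nums : List Int) : ∀ (d a m : ℕ), m - a ≤ d →
    (EWf nums a m).Pairwise (fun q r => q.1 < r.1) := by
  intro d
  induction d with
  | zero =>
    intro a m hd
    rw [EWf_nil (by omega)]; exact List.Pairwise.nil
  | succ d ih =>
    intro a m hd
    by_cases h : a < m
    · rw [EWf_unfold h, List.pairwise_append]
      refine ⟨?_, ih (a + 1) m (by omega), ?_⟩
      · by_cases hp : pvPrime (nums.getD a 0) = true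
        · rw [if_pos hp]; simp
        · rw [if_neg hp]; exact List.Pairwise.nil
      · intro x hx y hy
        have hxa : x = ((a : ℤ), nums.getD a 0) := by
          by_cases hp : pvPrime (nums.getD a 0) = true
          · rw [if_pos hp] at hx; simpa using hx
          · rw [if_neg hp] at hx; simp at hx
        rcases (EWf_mem nums m (a + 1) m (by omega) y).1 hy with ⟨t, ht1, _, _, hty⟩
        rw [hxa, hty]
        simp only []
        exact_mod_cast by omega
    · rw [EWf_nil (by omega)]; exact List.Pairwise.nil

lemma EWf_snd (nums : List Int) : ∀ (d a m : ℕ), m - a ≤ d → m ≤ nums.length →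
    (EWf nums a m).map Prod.snd = PVw nums a m := by
  intro d
  induction d with
  | zero =>
    intro a m hd hm
    rw [EWf_nil (by omega), PVw_nil (by omega)]; rfl
  | succ d ih =>
    intro a m hd hm
    by_cases h : a < m
    · rw [EWf_unfold h, List.map_append, ih (a + 1) m (by omega) hm]
      have hsp : PVw nums a m = PVw nums a (a + 1) ++ PVw nums (a + 1) m :=
        PVw_split nums (by omega) (by omega)
      have hone : PVw nums a (a + 1) =
          (if pvPrime (nums.getD a 0) then [nums.getD a 0] else []) := by
        have := PVw_succ nums (le_refl a) (by omega)
        rwa [PVw_nil (le_refl a), List.nil_append] at this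
      rw [hsp, hone]
      congr 1
      by_cases hp : pvPrime (nums.getD a 0) = true
      · rw [if_pos hp, if_pos hp]; rfl
      · rw [if_neg hp, if_neg hp]; rfl
    · rw [EWf_nil (by omega), PVw_nil (by omega)]; rfl

lemma EWf_head (nums : List Int) : ∀ (d a m : ℕ), m - a ≤ d →
    ∀ q rest, EWf nums a m = q :: rest →
    ∃ t0 : ℕ, a ≤ t0 ∧ t0 < m ∧ pvPrime (nums.getD t0 0) = true ∧
      q = ((t0 : ℤ), nums.getD t0 0) ∧ rest = EWf nums (t0 + 1) m ∧
      (∀ i, a ≤ i → i ≤ t0 → EWf nums i m = EWf nums a m) := by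
  intro d
  induction d with
  | zero =>
    intro a m hd q rest hq
    rw [EWf_nil (by omega)] at hq; exact absurd hq (by simp)
  | succ d ih =>
    intro a m hd q rest hq
    by_cases h : a < m
    · rw [EWf_unfold h] at hq
      by_cases hp : pvPrime (nums.getD a 0) = true
      · rw [if_pos hp] at hq
        simp only [List.cons_append, List.nil_append, List.cons.injEq] at hq
        refine ⟨a, le_refl a, h, hp, hq.1.symm, hq.2.symm, ?_⟩
        intro i hi1 hi2
        have : i = a := by omega
        rw [this]
      · rw [if_neg hp, List.nil_append] at hq
        rcases ih (a + 1) m (by omega) q rest hq with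
          ⟨t0, ht1, ht2, ht3, ht4, ht5, ht6⟩
        have hae : EWf nums a m = EWf nums (a + 1) m := by
          rw [EWf_unfold h, if_neg hp, List.nil_append]
        refine ⟨t0, by omega, ht2, ht3, ht4, ht5, ?_⟩
        intro i hi1 hi2
        by_cases hia : i = a
        · rw [hia]
        · rw [hae, ht6 i (by omega) hi2]
    · rw [EWf_nil (by omega)] at hq; exact absurd hq (by simp)

-- ---------- bridges for Python max()/min() over the window ----------

lemma pymax_getD {l : List Int} (h : l ≠ []) :
    (PySem.List.max? l (fun x => x)).getD 0 = MXL l := by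
  cases h' : PySem.List.max? l (fun x => x) with
  | none => exact absurd ((PySem.List.max?_eq_none_iff l _).1 h') h
  | some m =>
    simp only [Option.getD_some]
    exact le_antisymm (le_MXL (PySem.List.max?_mem h'))
      (PySem.List.max?_isMax h' (MXL l) (MXL_mem h))

lemma pymin_getD {l : List Int} (h : l ≠ []) :
    (PySem.List.min? l (fun x => x)).getD 0 = MNL l := by
  cases h' : PySem.List.min? l (fun x => x) with
  | none => exact absurd ((PySem.List.min?_eq_none_iff l _).1 h') h
  | some m =>
    simp only [Option.getD_some]
    exact le_antisymm (PySem.List.min?_isMin h' (MNL l) (MNL_mem h))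
      (MNL_le (PySem.List.min?_mem h'))

-- ---------- the shrink loop ----------

lemma pvShrink_spec (nums : List Int) (k : Int) {m : ℕ} (hm : m ≤ nums.length) :
    ∀ (d a : ℕ), m - a ≤ d → a ≤ m → (∀ i < a, Bd nums k i m) →
    ∃ a2 : ℕ, pvShrink k (EWf nums a m) (a : ℤ) = (EWf nums a2 m, (a2 : ℤ)) ∧
      a ≤ a2 ∧ a2 ≤ m ∧ (∀ i < a2, Bd nums k i m) ∧
      (2 ≤ (EWf nums a2 m).length → MXL (PVw nums a2 m) - MNL (PVw nums a2 m) ≤ k) := by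
  intro d
  induction d with
  | zero =>
    intro a hd ha hbd
    refine ⟨a, ?_, le_refl a, ha, hbd, ?_⟩
    · rw [EWf_nil (by omega)]; rfl
    · rw [EWf_nil (by omega)]; intro h2; simp at h2
  | succ d ih =>
    intro a hd ha hbd
    cases hE : EWf nums a m with
    | nil =>
      refine ⟨a, ?_, le_refl a, ha, hbd, ?_⟩
      · rw [hE]; rfl
      · rw [hE]; intro h2; simp at h2
    | cons w ws =>
      have hsnd : (EWf nums a m).map Prod.snd = PVw nums a m :=
        EWf_snd nums m a m (by omega) hm
      have hlen : (EWf nums a m).length = (PVw nums a m).length := by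
        rw [← hsnd]; simp
      have hne : PVw nums a m ≠ [] := by
        rw [← hsnd, hE]; simp
      have hmax : (PySem.List.max? ((w :: ws).map Prod.snd) (fun x => x)).getD 0
          = MXL (PVw nums a m) := by
        rw [← hE, hsnd]; exact pymax_getD hne
      have hmin : (PySem.List.min? ((w :: ws).map Prod.snd) (fun x => x)).getD 0
          = MNL (PVw nums a m) := by
        rw [← hE, hsnd]; exact pymin_getD hne
      have hlen2 : (w :: ws).length = (PVw nums a m).length := by rw [← hE]; exact hlen
      by_cases hb : Bd nums k a m
      · -- the guard holds: pop and recurse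
        have hguard : 2 ≤ (w :: ws).length ∧
            k < (PySem.List.max? ((w :: ws).map Prod.snd) (fun x => x)).getD 0 -
              (PySem.List.min? ((w :: ws).map Prod.snd) (fun x => x)).getD 0 := by
          rw [hmax, hmin, hlen2]; exact hb
        rcases EWf_head nums m a m (by omega) w ws hE with
          ⟨t0, ht1, ht2, ht3, ht4, ht5, ht6⟩
        have hbd' : ∀ i < t0 + 1, Bd nums k i m := by
          intro i hi
          by_cases hia : i < a
          · exact hbd i hia
          · have hEi : EWf nums i m = EWf nums a m := ht6 i (by omega) (by omega)
            have : PVw nums i m = PVw nums a m := by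
              rw [← EWf_snd nums m i m (by omega) hm, hEi, hsnd]
            rcases hb with ⟨hb1, hb2⟩
            exact ⟨by rw [this]; exact hb1, by rw [this]; exact hb2⟩
        rcases ih (t0 + 1) (by omega) (by omega) hbd' with
          ⟨a2, hres, h1, h2, h3, h4⟩
        refine ⟨a2, ?_, by omega, h2, h3, h4⟩
        have hstep : pvShrink k (w :: ws) (a : ℤ) =
            if 2 ≤ (w :: ws).length ∧
                k < (PySem.List.max? ((w :: ws).map Prod.snd) (fun x => x)).getD 0 -
                  (PySem.List.min? ((w :: ws).map Prod.snd) (fun x => x)).getD 0 then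
              pvShrink k ws (w.1 + 1)
            else (w :: ws, (a : ℤ)) := rfl
        rw [hstep, if_pos hguard, ht5]
        have hw1 : w.1 + 1 = ((t0 + 1 : ℕ) : ℤ) := by rw [ht4]; push_cast; ring
        rw [hw1]
        exact hres
      · -- the guard fails: stop here
        have hguard : ¬ (2 ≤ (w :: ws).length ∧
            k < (PySem.List.max? ((w :: ws).map Prod.snd) (fun x => x)).getD 0 -
              (PySem.List.min? ((w :: ws).map Prod.snd) (fun x => x)).getD 0) := by
          rw [hmax, hmin, hlen2]; exact hb
        refine ⟨a, ?_, le_refl a, ha, hbd, ?_⟩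
        · rw [hE]
          have hstep : pvShrink k (w :: ws) (a : ℤ) =
              if 2 ≤ (w :: ws).length ∧
                  k < (PySem.List.max? ((w :: ws).map Prod.snd) (fun x => x)).getD 0 -
                    (PySem.List.min? ((w :: ws).map Prod.snd) (fun x => x)).getD 0 then
                pvShrink k ws (w.1 + 1)
              else (w :: ws, (a : ℤ)) := rfl
          rw [hstep, if_neg hguard]
        · intro h2
          rw [hlen] at h2
          have : ¬ Bd nums k a m := hb
          simp only [Bd, not_and, not_lt] at this
          exact this h2

-- ---------- the per-endpoint count is the interval B adds ----------

lemma two_tail {α : Type} (l : List α) (h : 2 ≤ l.length) :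
    ∃ f x y, l = f ++ [x, y] := by
  rcases hr : l.reverse with _ | ⟨y, t⟩
  · rw [List.reverse_eq_nil_iff] at hr; subst hr; simp at h
  · rcases t with _ | ⟨x, f⟩
    · have : l = [y] := by
        have := congrArg List.reverse hr; simpa using this
      subst this; simp at h
    · refine ⟨f.reverse, x, y, ?_⟩
      have := congrArg List.reverse hr
      simpa using this

lemma two_mem_le_length {α : Type} {l : List α} {x y : α} (hx : x ∈ l) (hy : y ∈ l)
    (hne : x ≠ y) : 2 ≤ l.length := by
  cases l with
  | nil => simp at hx
  | cons a t =>
    cases t with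
    | nil =>
      simp only [List.mem_singleton] at hx hy
      exact absurd (hx.trans hy.symm) hne
    | cons b r => simp only [List.length_cons]; omega

lemma cnt_of_win (nums : List Int) (k : Int) {m a2 : ℕ} (hmn : m < nums.length)
    (ha : a2 ≤ m + 1) (hbd : ∀ i < a2, Bd nums k i (m + 1))
    (hgap : 2 ≤ (EWf nums a2 (m + 1)).length →
      MXL (PVw nums a2 (m + 1)) - MNL (PVw nums a2 (m + 1)) ≤ k) :
    (∑ i ∈ Finset.range nums.length, (if Gd nums k i (m + 1) then (1 : ℤ) else 0)) =
      (if 2 ≤ (EWf nums a2 (m + 1)).length then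
        (PySem.List.pyGetD (EWf nums a2 (m + 1)) (-2) (0, 0)).1 - (a2 : ℤ) + 1
      else 0) := by
  set M := m + 1 with hM
  have hMn : M ≤ nums.length := by omega
  by_cases h2 : 2 ≤ (EWf nums a2 M).length
  · rw [if_pos h2]
    obtain ⟨front, x, y, hfxy⟩ := two_tail _ h2
    have hpair : (EWf nums a2 M).Pairwise (fun q r => q.1 < r.1) :=
      EWf_pairwise nums M a2 M (by omega)
    have hxE : x ∈ EWf nums a2 M := by rw [hfxy]; simp
    have hyE : y ∈ EWf nums a2 M := by rw [hfxy]; simp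
    rcases (EWf_mem nums M a2 M (by omega) x).1 hxE with ⟨t, ht1, ht2, ht3, ht4⟩
    rcases (EWf_mem nums M a2 M (by omega) y).1 hyE with ⟨ty, hty1, hty2, hty3, hty4⟩
    have hxy : x.1 < y.1 := by
      rw [hfxy] at hpair
      rcases List.pairwise_append.1 hpair with ⟨_, hp2, _⟩
      exact (List.pairwise_cons.1 hp2).1 y (by simp)
    have htty : t < ty := by
      rw [ht4, hty4] at hxy
      dsimp only at hxy
      exact_mod_cast hxy
    have hfront : ∀ z ∈ front, z.1 < x.1 := by
      intro z hz
      rw [hfxy] at hpair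
      rcases List.pairwise_append.1 hpair with ⟨_, _, hp3⟩
      exact hp3 z hz x (by simp)
    have honly : ∀ z ∈ EWf nums a2 M, x.1 < z.1 → z = y := by
      intro z hz hgt
      rw [hfxy] at hz
      rcases List.mem_append.1 hz with hz | hz
      · exact absurd (hfront z hz) (by omega)
      · rcases List.mem_cons.1 hz with hz | hz
        · subst hz; omega
        · simpa using hz
    -- the valid left endpoints are exactly the interval [a2, t]
    have hiff : ∀ i, Gd nums k i M ↔ (a2 ≤ i ∧ i ≤ t) := by
      intro i
      constructor
      · intro hg
        by_contra hcon
        rcases hg with ⟨hg1, hg2⟩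
        by_cases hia : i < a2
        · rcases hbd i hia with ⟨_, hb2⟩; omega
        · have hit : t < i := by omega
          have hiM : i < M := by
            by_contra hiM
            rw [PVw_nil (by omega)] at hg1; simp at hg1
          have hsndi : (EWf nums i M).map Prod.snd = PVw nums i M :=
            EWf_snd nums M i M (by omega) hMn
          have hleni : 2 ≤ (EWf nums i M).length := by
            have hl : (EWf nums i M).length = (PVw nums i M).length := by
              rw [← hsndi]; simp
            rw [hl]; exact hg1
          have hsplit : EWf nums a2 M = EWf nums a2 i ++ EWf nums i M :=
            EWf_split nums M a2 i M (by omega) (by omega) (by omega)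
          obtain ⟨u, w, rest, huw⟩ : ∃ u w rest, EWf nums i M = u :: w :: rest := by
            cases hE : EWf nums i M with
            | nil => rw [hE] at hleni; simp at hleni
            | cons u tl =>
              cases htl : tl with
              | nil => rw [hE, htl] at hleni; simp at hleni
              | cons w rest => exact ⟨u, w, rest, rfl⟩
          have hpos : ∀ z ∈ EWf nums i M, x.1 < z.1 := by
            intro z hz
            rcases (EWf_mem nums M i M (by omega) z).1 hz with ⟨tz, htz1, _, _, htz4⟩
            rw [ht4, htz4]
            exact_mod_cast by omega
          have huE : u ∈ EWf nums a2 M := by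
            rw [hsplit]; exact List.mem_append_right _ (by rw [huw]; simp)
          have hwE : w ∈ EWf nums a2 M := by
            rw [hsplit]; exact List.mem_append_right _ (by rw [huw]; simp)
          have hu : u = y := honly u huE (hpos u (by rw [huw]; simp))
          have hw : w = y := honly w hwE (hpos w (by rw [huw]; simp))
          have hpi : (EWf nums i M).Pairwise (fun q r => q.1 < r.1) :=
            EWf_pairwise nums M i M (by omega)
          rw [huw] at hpi
          have := (List.pairwise_cons.1 hpi).1 w (by simp)
          rw [hu, hw] at this
          omega
      · rintro ⟨hi1, hi2⟩
        have hiM : i < M := by omega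
        have hxEi : x ∈ EWf nums i M :=
          (EWf_mem nums M i M (by omega) x).2 ⟨t, by omega, ht2, ht3, ht4⟩
        have hyEi : y ∈ EWf nums i M :=
          (EWf_mem nums M i M (by omega) y).2 ⟨ty, by omega, hty2, hty3, hty4⟩
        have hxyne : x ≠ y := by
          intro hcon; rw [hcon] at hxy; omega
        have hlen2 : 2 ≤ (EWf nums i M).length := two_mem_le_length hxEi hyEi hxyne
        have hsndi : (EWf nums i M).map Prod.snd = PVw nums i M :=
          EWf_snd nums M i M (by omega) hMn
        have hlenP : 2 ≤ (PVw nums i M).length := by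
          rw [← hsndi]; simpa using hlen2
        refine ⟨hlenP, ?_⟩
        have hsub : ∀ v ∈ PVw nums i M, v ∈ PVw nums a2 M := by
          intro v hv
          rw [PVw_split nums (a := a2) (b := i) (e := M) hi1 (by omega)]
          exact List.mem_append_right _ hv
        have hneP : PVw nums i M ≠ [] := by
          intro hcon; rw [hcon] at hlenP; simp at hlenP
        have := gap_mono hsub hneP
        have hk := hgap h2
        omega
    have hx2 : (PySem.List.pyGetD (EWf nums a2 M) (-2) (0, 0)).1 = (t : ℤ) := by
      rw [hfxy, PySem.List.pyGetD_neg_ofNat (front ++ [x, y]) 2 (0, 0) (by omega)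
        (by simp), List.getElem_append_right (by simp)]
      simp [ht4]
    rw [hx2]
    calc (∑ i ∈ Finset.range nums.length, if Gd nums k i M then (1 : ℤ) else 0)
        = ∑ i ∈ Finset.range nums.length, if a2 ≤ i ∧ i ≤ t then (1 : ℤ) else 0 := by
          refine Finset.sum_congr rfl (fun i _ => ?_)
          exact if_congr (hiff i) rfl rfl
      _ = ((Finset.range nums.length).filter (fun i => a2 ≤ i ∧ i ≤ t)).card := by
          rw [Finset.sum_boole]
      _ = (Finset.Icc a2 t).card := by
          have hset : (Finset.range nums.length).filter (fun i => a2 ≤ i ∧ i ≤ t)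
              = Finset.Icc a2 t := by
            ext j
            simp only [Finset.mem_filter, Finset.mem_range, Finset.mem_Icc]
            constructor
            · rintro ⟨_, h⟩; exact h
            · rintro ⟨hj1, hj2⟩; exact ⟨by omega, hj1, hj2⟩
          rw [hset]
      _ = (t : ℤ) - (a2 : ℤ) + 1 := by
          rw [Nat.card_Icc]
          have hat : a2 ≤ t := by omega
          omega
  · rw [if_neg h2]
    refine Finset.sum_eq_zero (fun i _ => ?_)
    rw [if_neg]
    intro hg
    rcases hg with ⟨hg1, hg2⟩
    by_cases hia : i < a2
    · rcases hbd i hia with ⟨_, hb2⟩; omega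
    · by_cases hiM : i < M
      · have hsndi : (EWf nums i M).map Prod.snd = PVw nums i M :=
          EWf_snd nums M i M (by omega) hMn
        have hsplit : EWf nums a2 M = EWf nums a2 i ++ EWf nums i M :=
          EWf_split nums M a2 i M (by omega) (by omega) (by omega)
        have : (EWf nums i M).length ≤ (EWf nums a2 M).length := by
          rw [hsplit, List.length_append]; omega
        have hlenP : (PVw nums i M).length ≤ (EWf nums a2 M).length := by
          rw [← hsndi]; simpa using this
        omega
      · rw [PVw_nil (by omega)] at hg1; simp at hg1

-- ---------- B-side main loop ----------

def SB (nums : List Int) (k : Int) (m : ℕ) : ℤ :=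
  ∑ j ∈ Finset.range m, ∑ i ∈ Finset.range nums.length,
    (if Gd nums k i (j + 1) then (1 : ℤ) else 0)

lemma Bloop (nums : List Int) (k : Int) :
    ∀ (d m : ℕ), nums.length - m ≤ d → m ≤ nums.length → ∀ (a : ℕ), a ≤ m →
    (∀ i < a, Bd nums k i m) →
    (((PySem.List.pyRange (m : ℤ) ((nums.length : ℕ) : ℤ)).map
        (fun j => (j, PySem.List.pyGetD nums j 0))).foldl
      (fun (s : Int × Int × List (Int × Int)) jv =>
        let win1 := if pvPrime jv.2 then s.2.2 ++ [jv] else s.2.2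
        let r := pvShrink k win1 s.2.1
        let ans' :=
          if 2 ≤ r.1.length then s.1 + (PySem.List.pyGetD r.1 (-2) (0, 0)).1 - r.2 + 1
          else s.1
        (ans', r.2, r.1)) (SB nums k m, (a : ℤ), EWf nums a m)).1 = SB nums k nums.length := by
  intro d
  induction d with
  | zero =>
    intro m hd hmn a ham hbd
    have hm : m = nums.length := by omega
    subst hm
    rw [PySem.List.pyRange_one_eq_nil (le_refl _)]
    rfl
  | succ d ih =>
    intro m hd hmn a ham hbd
    by_cases h : m < nums.length
    · have hcast : ((m : ℕ) : ℤ) < ((nums.length : ℕ) : ℤ) := by exact_mod_cast h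
      rw [PySem.List.pyRange_one_cons hcast, List.map_cons, List.foldl_cons]
      dsimp only
      rw [PySem.List.pyGetD_natCast]
      set v := nums.getD m 0 with hv
      have hwin1 : (if pvPrime v = true then EWf nums a m ++ [((m : ℤ), v)]
            else EWf nums a m) = EWf nums a (m + 1) := by
        rw [EWf_split nums (m + 1) a m (m + 1) (by omega) ham (by omega),
          EWf_unfold (show m < m + 1 by omega), EWf_nil (le_refl (m + 1)),
          List.append_nil]
        by_cases hp : pvPrime v = true
        · rw [if_pos hp, if_pos (show pvPrime (nums.getD m 0) = true from hp)]
        · rw [if_neg hp, if_neg (show ¬ pvPrime (nums.getD m 0) = true from hp),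
            List.append_nil]
      have hbd1 : ∀ i < a, Bd nums k i (m + 1) := fun i hi =>
        Bd_mono (hbd i hi) (by omega)
      rcases pvShrink_spec nums k (show m + 1 ≤ nums.length by omega) (m + 1) a
        (by omega) (by omega) hbd1 with ⟨a2, hres, h1, h2, h3, h4⟩
      rw [hwin1, hres]
      dsimp only
      have hcnt := cnt_of_win nums k h h2 h3 h4
      have hSB : (if 2 ≤ (EWf nums a2 (m + 1)).length then
            SB nums k m + (PySem.List.pyGetD (EWf nums a2 (m + 1)) (-2) (0, 0)).1 -
              (a2 : ℤ) + 1
          else SB nums k m) = SB nums k (m + 1) := by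
        have hs : SB nums k (m + 1) = SB nums k m +
            ∑ i ∈ Finset.range nums.length,
              (if Gd nums k i (m + 1) then (1 : ℤ) else 0) := by
          unfold SB; rw [Finset.sum_range_succ]
        rw [hs, hcnt]
        by_cases hl : 2 ≤ (EWf nums a2 (m + 1)).length
        · rw [if_pos hl, if_pos hl]; ring
        · rw [if_neg hl, if_neg hl]; ring
      rw [hSB]
      have hc1 : ((m : ℕ) : ℤ) + 1 = (((m + 1 : ℕ)) : ℤ) := by push_cast; ring
      rw [hc1]
      exact ih (m + 1) (by omega) (by omega) a2 h2 h3
    · have hm : m = nums.length := by omega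
      subst hm
      rw [PySem.List.pyRange_one_eq_nil (le_refl _)]
      rfl

lemma primeSubarray_alt_eq_sum (nums : List Int) (k : Int) :
    primeSubarray_alt nums k = SB nums k nums.length := by
  unfold primeSubarray_alt
  rw [PySem.List.enumerate_eq_map_pyRange nums 0, PySem.List.len_eq]
  have h0 := Bloop nums k nums.length 0 (by omega) (by omega) 0 (le_refl 0)
    (by intro i hi; omega)
  rw [EWf_nil (le_refl 0)] at h0
  have hSB0 : SB nums k 0 = 0 := by simp [SB]
  rw [hSB0, Nat.cast_zero] at h0
  exact h0

-- ---------- counting pairs in either order ----------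

lemma sum_exchange (nums : List Int) (k : Int) :
    (∑ i ∈ Finset.range nums.length, ∑ j ∈ Finset.Ico i nums.length,
        (if Gd nums k i (j + 1) then (1 : ℤ) else 0)) = SB nums k nums.length := by
  unfold SB
  have hstep : ∀ i ∈ Finset.range nums.length,
      (∑ j ∈ Finset.Ico i nums.length, (if Gd nums k i (j + 1) then (1 : ℤ) else 0))
        = ∑ j ∈ Finset.range nums.length, (if Gd nums k i (j + 1) then (1 : ℤ) else 0) := by
    intro i hi
    rw [Finset.mem_range] at hi
    rw [Finset.range_eq_Ico, ← Finset.sum_Ico_consecutive _ (Nat.zero_le i) (le_of_lt hi)]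
    have hz : (∑ j ∈ Finset.Ico 0 i, (if Gd nums k i (j + 1) then (1 : ℤ) else 0)) = 0 :=
      Finset.sum_eq_zero (fun j hj => by
        rw [Finset.mem_Ico] at hj
        exact if_neg (Gd_false_of_le (by omega)))
    rw [hz, zero_add]
  rw [Finset.sum_congr rfl hstep]
  exact Finset.sum_comm


-- ===== VERDICT (by name: the statement is the Claim_ definition above) =====
theorem primeSubarray_spec : Claim_equal_primeSubarray := by
  intro nums k _ _
  unfold Spec_primeSubarray
  rw [primeSubarray_eq_sum, primeSubarray_alt_eq_sum, sum_exchange]
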